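-- pv_equiv track=rewrite | github.com/williamrubio1/ESE | ValidacionJSON/modules/reformador_pyp.py | ordenar_campos_servicio
-- ===== SOURCE A (Python) =====
-- def ordenar_campos_servicio(servicio_dict, orden_campos):
--     """
--     Reordena los campos de un servicio según el orden especificado.
--
--     Args:
--         servicio_dict: Diccionario con los campos del servicio
--         orden_campos: Lista con el orden deseado de campos
--
--     Returns:
--         Diccionario con campos en el orden especificado
--     """
--     resultado = {}
--     # Primero agregar campos en el orden especificado
--     for campo in orden_campos:
--         if campo in servicio_dict:
--             resultado[campo] = servicio_dict[campo]
--     # Luego agregar cualquier campo extra que no esté en la lista de orden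
--     for campo, valor in servicio_dict.items():
--         if campo not in resultado:
--             resultado[campo] = valor
--     return resultado
-- ===== SOURCE B (Python) =====
-- def ordenar_campos_servicio(servicio_dict, orden_campos):
--     """Single stable sort with a first-occurrence index table; extras get a
--     sentinel key >= len(orden_campos), so they keep insertion order at the end."""
--     index = {}
--     for i, campo in enumerate(orden_campos):
--         if campo not in index:
--             index[campo] = i
--     centinela = len(orden_campos)
--     return dict(sorted(servicio_dict.items(),
--                        key=lambda kv: index.get(kv[0], centinela)))
-- ===== Notes on version B (the rewrite author's own statement) =====
-- stated objective: alternative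
-- what changed: Replaces A's two accumulate-into-a-result-dict loops (ordered fields first, then a scan appending extras not yet in the result) by a single stable sort of the items keyed through a precomputed first-occurrence index table, with len(orden_campos) as sentinel key for unlisted fields.
import Mathlib
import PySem

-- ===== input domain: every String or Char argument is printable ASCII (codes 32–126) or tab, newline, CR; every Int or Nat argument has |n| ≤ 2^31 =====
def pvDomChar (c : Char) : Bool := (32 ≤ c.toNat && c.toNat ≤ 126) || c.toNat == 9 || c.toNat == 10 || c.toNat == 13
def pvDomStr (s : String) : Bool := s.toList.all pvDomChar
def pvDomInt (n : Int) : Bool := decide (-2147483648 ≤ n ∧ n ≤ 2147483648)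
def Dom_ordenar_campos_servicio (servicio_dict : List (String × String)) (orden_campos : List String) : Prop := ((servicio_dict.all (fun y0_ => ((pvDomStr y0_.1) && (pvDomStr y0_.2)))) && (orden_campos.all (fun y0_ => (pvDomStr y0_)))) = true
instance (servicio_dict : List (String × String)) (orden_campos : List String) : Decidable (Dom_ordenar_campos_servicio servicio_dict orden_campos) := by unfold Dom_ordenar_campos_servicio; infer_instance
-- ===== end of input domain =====

-- B replaces A's two accumulate-into-a-dict loops by ONE stable sort keyed by a
-- first-occurrence index table with a sentinel for unlisted fields (objective: alternative).

-- ===== PORT A =====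
-- loop body of A's first loop: 'if campo in servicio_dict: resultado[campo] = servicio_dict[campo]'
-- (the lookup servicio_dict[campo] is guarded by the contains test, so getD with a dummy default is exact)
def pvStepOrden (d : PySem.Dict String String) (resultado : PySem.Dict String String) (campo : String) : PySem.Dict String String :=
  if d.contains campo then resultado.insert campo (d.getD campo "") else resultado

-- loop body of A's second loop: 'if campo not in resultado: resultado[campo] = valor'
def pvStepExtra (resultado : PySem.Dict String String) (p : String × String) : PySem.Dict String String :=
  if resultado.contains p.1 then resultado else resultado.insert p.1 p.2

def ordenar_campos_servicio (servicio_dict : List (String × String)) (orden_campos : List String) : List (String × String) :=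
  let d : PySem.Dict String String := PySem.Dict.mk servicio_dict
  let resultado₁ : PySem.Dict String String := orden_campos.foldl (pvStepOrden d) PySem.Dict.empty
  let resultado₂ : PySem.Dict String String := d.items.foldl pvStepExtra resultado₁
  resultado₂.items

-- ===== PORT B =====
-- loop body of B's index loop: 'if campo not in index: index[campo] = i'  (p = (i, campo))
def pvStepIndex (index : PySem.Dict String Int) (p : Int × String) : PySem.Dict String Int :=
  if index.contains p.2 then index else index.insert p.2 p.1

-- B's sort key: 'index.get(kv[0], centinela)'
def pvKey (index : PySem.Dict String Int) (centinela : Int) (kv : String × String) : Int :=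
  index.getD kv.1 centinela

def ordenar_campos_servicio_alt (servicio_dict : List (String × String)) (orden_campos : List String) : List (String × String) :=
  let index : PySem.Dict String Int :=
    (PySem.List.enumerate orden_campos).foldl pvStepIndex PySem.Dict.empty
  let centinela : Int := PySem.List.len orden_campos
  (PySem.Dict.ofList
    (PySem.List.sorted (PySem.Dict.mk servicio_dict).items (pvKey index centinela))).items

-- ===== PRECONDITION & SPEC =====
-- servicio_dict stands for a Python dict, whose keys are necessarily distinct; an
-- association list with a duplicated key does not represent any dict input of A.
def Pre_ordenar_campos_servicio (servicio_dict : List (String × String)) (orden_campos : List String) : Prop :=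
  (servicio_dict.map Prod.fst).Nodup

instance (servicio_dict : List (String × String)) (orden_campos : List String) : Decidable (Pre_ordenar_campos_servicio servicio_dict orden_campos) := by unfold Pre_ordenar_campos_servicio; infer_instance

def pvWitness_ordenar_campos_servicio : (List (String × String)) × List String :=
  ([("b", "2"), ("a", "1"), ("z", "9")], ["a", "b", "c"])

def Spec_ordenar_campos_servicio (servicio_dict : List (String × String)) (orden_campos : List String) (out : List (String × String)) : Prop := out = ordenar_campos_servicio_alt servicio_dict orden_campos
instance (servicio_dict : List (String × String)) (orden_campos : List String) (out : List (String × String)) : Decidable (Spec_ordenar_campos_servicio servicio_dict orden_campos out) := by unfold Spec_ordenar_campos_servicio; infer_instance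

-- ===== CLAIM (what is proved, stated in full; the proofs are below) =====
def Claim_equal_ordenar_campos_servicio : Prop := ∀ (servicio_dict : List (String × String)) (orden_campos : List String), Dom_ordenar_campos_servicio servicio_dict orden_campos → Pre_ordenar_campos_servicio servicio_dict orden_campos → Spec_ordenar_campos_servicio servicio_dict orden_campos (ordenar_campos_servicio servicio_dict orden_campos)

-- ===== LEMMAS AND PROOFS =====

theorem getD_foldl_stepIndex (k : String) (dflt : Int) :
    ∀ (oc : List String) (s : Int) (dct : PySem.Dict String Int),
    ((PySem.List.enumerate oc s).foldl pvStepIndex dct).getD k dflt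
      = if dct.contains k then dct.getD k dflt
        else if k ∈ oc then s + (oc.idxOf k : Int) else dflt := by
  intro oc
  induction oc with
  | nil =>
    intro s dct
    simp only [PySem.List.enumerate_nil, List.foldl_nil, List.not_mem_nil, if_false]
    by_cases hk : dct.contains k = true
    · simp [hk]
    · simp [hk, PySem.Dict.getD_of_not_contains dct dflt (by simpa using hk)]
  | cons c oc ih =>
    intro s dct
    rw [PySem.List.enumerate_cons, List.foldl_cons]
    by_cases hc : dct.contains c = true
    · have hstep : pvStepIndex dct (s, c) = dct := by simp [pvStepIndex, hc]
      rw [hstep, ih]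
      by_cases hk : dct.contains k = true
      · simp [hk]
      · simp only [hk]
        have hkc : k ≠ c := by rintro rfl; exact hk hc
        by_cases hmem : k ∈ oc
        · simp [hmem, hkc, List.idxOf_cons_ne _ (by simpa using (Ne.symm hkc))]
          ring
        · simp [hmem, hkc]
    · have hstep : pvStepIndex dct (s, c) = dct.insert c s := by
        simp [pvStepIndex, hc]
      rw [hstep, ih]
      by_cases hkc : k = c
      · subst hkc
        rw [PySem.Dict.contains_insert, PySem.Dict.getD_insert]
        simp [hc]
      · rw [PySem.Dict.contains_insert, PySem.Dict.getD_insert]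
        have hbeq : (k == c) = false := by simpa using hkc
        simp only [hbeq, Bool.false_or, if_neg hkc]
        by_cases hk : dct.contains k = true
        · simp [hk]
        · simp only [hk]
          by_cases hmem : k ∈ oc
          · simp [hmem, hkc, List.idxOf_cons_ne _ (by simpa using (Ne.symm hkc))]
            ring
          · simp [hmem, hkc]

theorem key_char (oc : List String) (kv : String × String) :
    pvKey ((PySem.List.enumerate oc).foldl pvStepIndex PySem.Dict.empty) (PySem.List.len oc) kv
      = if kv.1 ∈ oc then (oc.idxOf kv.1 : Int) else (oc.length : Int) := by
  unfold pvKey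
  rw [getD_foldl_stepIndex]
  simp [PySem.Dict.contains_empty, PySem.List.len_eq]

theorem insertBy_append_of_forall_before {α : Type} (before : α → α → Bool) (x : α)
    (us vs : List α) (h : ∀ b ∈ vs, before x b = true) :
    PySem.List.insertBy before x (us ++ vs) = PySem.List.insertBy before x us ++ vs := by
  induction us with
  | nil =>
    cases vs with
    | nil => simp
    | cons b t => simp [PySem.List.insertBy, h b (by simp)]
  | cons u us ih =>
    by_cases hu : before x u = true
    · simp [PySem.List.insertBy, hu]
    · simp [PySem.List.insertBy, hu, ih]

theorem sorted_append_singleton {α : Type} (l : List α) (x : α) (key : α → Int) :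
    PySem.List.sorted (l ++ [x]) key
      = PySem.List.insertBy (fun a b => decide (key a < key b)) x (PySem.List.sorted l key) := by
  rw [PySem.List.sorted_eq_foldl_insertBy, PySem.List.sorted_eq_foldl_insertBy, List.foldl_append]
  rfl

theorem sorted_split_sentinel {α : Type} (key : α → Int) (n : Int) :
    ∀ (xs : List α), (∀ x ∈ xs, key x ≤ n) →
    PySem.List.sorted xs key
      = PySem.List.sorted (xs.filter (fun x => decide (key x < n))) key
          ++ xs.filter (fun x => decide (key x = n)) := by
  intro xs
  induction xs using List.reverseRecOn with
  | nil => simp [PySem.List.sorted]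
  | append_singleton xs x ih =>
    intro h
    have hxs : ∀ y ∈ xs, key y ≤ n := fun y hy => h y (by simp [hy])
    have hx : key x ≤ n := h x (by simp)
    rw [sorted_append_singleton, ih hxs, List.filter_append, List.filter_append]
    by_cases hxn : key x = n
    · have hlt : ¬ (key x < n) := by omega
      rw [PySem.List.insertBy_of_forall_not_before]
      · simp [hxn]
      · intro y hy
        have hyxs : y ∈ xs := by
          rcases List.mem_append.mp hy with hy2 | hy2
          · exact List.mem_of_mem_filter ((PySem.List.mem_sorted _ _ _ _).mp hy2)
          · exact List.mem_of_mem_filter hy2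
        have hkey := hxs y hyxs
        simp only [decide_eq_false_iff_not]
        omega
    · have hlt : key x < n := by omega
      rw [insertBy_append_of_forall_before]
      · simp [hxn, hlt, sorted_append_singleton]
      · intro b hb
        have hbn : key b = n := by simpa using (List.mem_filter.mp hb).2
        simp [hbn, hlt]

theorem foldl_stepOrden_char (d : PySem.Dict String String) :
    ∀ (pre : List String),
    (pre.foldl (pvStepOrden d) PySem.Dict.empty).keys.Nodup
    ∧ (∀ p ∈ (pre.foldl (pvStepOrden d) PySem.Dict.empty).items,
        p.2 = d.getD p.1 "" ∧ p.1 ∈ pre ∧ d.contains p.1 = true)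
    ∧ (∀ k, (pre.foldl (pvStepOrden d) PySem.Dict.empty).contains k = true
        ↔ (k ∈ pre ∧ d.contains k = true))
    ∧ (pre.foldl (pvStepOrden d) PySem.Dict.empty).items.Pairwise
        (fun a b => pre.idxOf a.1 < pre.idxOf b.1) := by
  intro pre
  induction pre using List.reverseRecOn with
  | nil =>
    refine ⟨by simp [PySem.Dict.keys_empty], ?_, ?_, ?_⟩ <;>
      simp [PySem.Dict.contains_empty, show (PySem.Dict.empty : PySem.Dict String String).items = [] from rfl]
  | append_singleton pre c ih =>
    obtain ⟨hnd, hval, hcont, hpw⟩ := ih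
    rw [List.foldl_append, List.foldl_cons, List.foldl_nil]
    set r := pre.foldl (pvStepOrden d) PySem.Dict.empty with hr
    have hidx : ∀ a : String, a ∈ pre → (pre ++ [c]).idxOf a = pre.idxOf a := by
      intro a ha; rw [List.idxOf_append, if_pos ha]
    by_cases hdc : d.contains c = true
    · by_cases hrc : r.contains c = true
      · have hcpre : c ∈ pre := ((hcont c).mp hrc).1
        have hstep : pvStepOrden d r c = r.insert c (d.getD c "") := by
          simp [pvStepOrden, hdc]
        have hitems : (r.insert c (d.getD c "")).items = r.items := by
          rw [PySem.Dict.items_insert_of_contains r _ hrc]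
          nth_rewrite 2 [← List.map_id r.items]
          apply List.map_congr_left
          intro p hp
          by_cases hpc : p.1 = c
          · have := (hval p hp).1
            simp only [hpc, beq_self_eq_true, if_true, id]
            rw [← hpc, ← this]
          · simp [hpc]
        refine ⟨?_, ?_, ?_, ?_⟩
        · rw [hstep]; exact PySem.Dict.nodup_keys_insert _ _ _ hnd
        · rw [hstep, hitems]
          intro p hp
          exact ⟨(hval p hp).1, by simp [(hval p hp).2.1], (hval p hp).2.2⟩
        · intro k
          rw [hstep, PySem.Dict.contains_insert]
          by_cases hkc : k = c
          · subst hkc; simp [hcpre, hdc]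
          · have : (k == c) = false := by simpa using hkc
            simp only [this, Bool.false_or, hcont k, List.mem_append,
              List.mem_singleton, hkc, or_false]
        · rw [hstep, hitems]
          refine hpw.imp_of_mem ?_
          intro a b ha hb hab
          rw [hidx a.1 (hval a ha).2.1, hidx b.1 (hval b hb).2.1]
          exact hab
      · have hstep : pvStepOrden d r c = r.insert c (d.getD c "") := by
          simp [pvStepOrden, hdc]
        have hcpre : c ∉ pre := by
          intro hmem
          exact hrc ((hcont c).mpr ⟨hmem, hdc⟩)
        have hrcf : r.contains c = false := by simpa using hrc
        have hitems : (r.insert c (d.getD c "")).items = r.items ++ [(c, d.getD c "")] :=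
          PySem.Dict.items_insert_of_not_contains r _ hrcf
        refine ⟨?_, ?_, ?_, ?_⟩
        · rw [hstep]; exact PySem.Dict.nodup_keys_insert _ _ _ hnd
        · rw [hstep, hitems]
          intro p hp
          rcases List.mem_append.mp hp with hp | hp
          · exact ⟨(hval p hp).1, by simp [(hval p hp).2.1], (hval p hp).2.2⟩
          · rcases List.mem_singleton.mp hp with rfl
            exact ⟨rfl, by simp, hdc⟩
        · intro k
          rw [hstep, PySem.Dict.contains_insert]
          by_cases hkc : k = c
          · subst hkc; simp [hdc]
          · have : (k == c) = false := by simpa using hkc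
            simp only [this, Bool.false_or, hcont k, List.mem_append,
              List.mem_singleton, hkc, or_false]
        · rw [hstep, hitems]
          rw [List.pairwise_append]
          refine ⟨?_, by simp, ?_⟩
          · refine hpw.imp_of_mem ?_
            intro a b ha hb hab
            rw [hidx a.1 (hval a ha).2.1, hidx b.1 (hval b hb).2.1]
            exact hab
          · intro a ha b hb
            rcases List.mem_singleton.mp hb with rfl
            have ha1 : a.1 ∈ pre := (hval a ha).2.1
            rw [hidx a.1 ha1]
            have hc1 : (pre ++ [c]).idxOf c = pre.length := by
              rw [List.idxOf_append, if_neg hcpre]; simp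
            rw [hc1]
            exact List.idxOf_lt_length_of_mem ha1
    · have hstep : pvStepOrden d r c = r := by simp [pvStepOrden, hdc]
      rw [hstep]
      refine ⟨hnd, ?_, ?_, ?_⟩
      · intro p hp
        exact ⟨(hval p hp).1, by simp [(hval p hp).2.1], (hval p hp).2.2⟩
      · intro k
        rw [hcont k]
        constructor
        · rintro ⟨hk, hdk⟩; exact ⟨by simp [hk], hdk⟩
        · rintro ⟨hk, hdk⟩
          rcases List.mem_append.mp hk with hk | hk
          · exact ⟨hk, hdk⟩
          · rcases List.mem_singleton.mp hk with rfl
            exact absurd hdk hdc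
      · refine hpw.imp_of_mem ?_
        intro a b ha hb hab
        rw [hidx a.1 (hval a ha).2.1, hidx b.1 (hval b hb).2.1]
        exact hab

theorem foldl_stepExtra_items :
    ∀ (l : List (String × String)) (r : PySem.Dict String String),
    (l.map Prod.fst).Nodup →
    (l.foldl pvStepExtra r).items = r.items ++ l.filter (fun p => !(r.contains p.1)) := by
  intro l
  induction l with
  | nil => intro r _; simp
  | cons p t ih =>
    intro r hnd
    have hnd' : (p.1 :: t.map Prod.fst).Nodup := by simpa using hnd
    have hndt : (t.map Prod.fst).Nodup := (List.nodup_cons.mp hnd').2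
    rw [List.foldl_cons]
    by_cases hrp : r.contains p.1 = true
    · have hstep : pvStepExtra r p = r := by simp [pvStepExtra, hrp]
      rw [hstep, ih r hndt, List.filter_cons]
      simp [hrp]
    · have hrpf : r.contains p.1 = false := by simpa using hrp
      have hstep : pvStepExtra r p = r.insert p.1 p.2 := by simp [pvStepExtra, hrpf]
      rw [hstep, ih _ hndt, List.filter_cons]
      have hfresh : ∀ q ∈ t, ((r.insert p.1 p.2).contains q.1) = r.contains q.1 := by
        intro q hq
        rw [PySem.Dict.contains_insert]
        have : (q.1 == p.1) = false := by
          have hne : q.1 ≠ p.1 := by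
            have hni := (List.nodup_cons.mp hnd').1
            intro h; exact hni (h ▸ List.mem_map.mpr ⟨q, hq, rfl⟩)
          simpa using hne
        simp [this]
      rw [List.filter_congr (fun q hq => by rw [hfresh q hq])]
      rw [PySem.Dict.items_insert_of_not_contains r _ hrpf]
      simp [hrpf]

theorem items_ofList_of_nodup (l : List (String × String))
    (h : (l.map Prod.fst).Nodup) : (PySem.Dict.ofList l).items = l := by
  have := PySem.Dict.items_foldl_insert_fresh l Prod.fst Prod.snd PySem.Dict.empty
    (fun a _ => PySem.Dict.contains_empty _) h
  simpa [PySem.Dict.ofList, PySem.Dict.update,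
    show (PySem.Dict.empty : PySem.Dict String String).items = [] from rfl] using this

-- ===== VERDICT (by name: the statement is the Claim_ definition above) =====

set_option maxHeartbeats 1000000 in
theorem ordenar_campos_servicio_spec : Claim_equal_ordenar_campos_servicio := by
  intro sd oc _hdom hpre
  unfold Spec_ordenar_campos_servicio
  unfold ordenar_campos_servicio ordenar_campos_servicio_alt
  simp only []
  set d : PySem.Dict String String := PySem.Dict.mk sd with hd
  set index : PySem.Dict String Int :=
    (PySem.List.enumerate oc).foldl pvStepIndex PySem.Dict.empty with hindex
  set n : Int := PySem.List.len oc with hn0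
  set key : String × String → Int := pvKey index n with hkeydef
  set r1 : PySem.Dict String String := oc.foldl (pvStepOrden d) PySem.Dict.empty with hr1
  have hpre' : (sd.map Prod.fst).Nodup := hpre
  have hitems_d : d.items = sd := rfl
  have hkeys_d : d.keys = sd.map Prod.fst := by
    rw [hd]; exact PySem.Dict.keys_mk sd
  have hndk : d.keys.Nodup := by rw [hkeys_d]; exact hpre'
  have hnlen : n = (oc.length : Int) := by rw [hn0, PySem.List.len_eq]
  have hkey : ∀ kv : String × String,
      key kv = if kv.1 ∈ oc then (oc.idxOf kv.1 : Int) else (oc.length : Int) := by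
    intro kv; rw [hkeydef, hindex, hn0]; exact key_char oc kv
  have hkeyle : ∀ kv : String × String, key kv ≤ n := by
    intro kv; rw [hkey kv, hnlen]
    by_cases h : kv.1 ∈ oc
    · simp only [h, if_true]
      exact_mod_cast Nat.le_of_lt (List.idxOf_lt_length_of_mem h)
    · simp [h]
  have hklt : ∀ kv : String × String, key kv < n ↔ kv.1 ∈ oc := by
    intro kv; rw [hkey kv, hnlen]
    by_cases h : kv.1 ∈ oc
    · simp only [h, if_true, iff_true]
      exact_mod_cast List.idxOf_lt_length_of_mem h
    · simp [h]
  have hkeq : ∀ kv : String × String, key kv = n ↔ kv.1 ∉ oc := by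
    intro kv
    constructor
    · intro h hmem
      exact absurd h (by have := (hklt kv).mpr hmem; omega)
    · intro h; rw [hkey kv, if_neg h, hnlen]
  have hdcont : ∀ p : String × String, p ∈ sd → d.contains p.1 = true := by
    intro p hp
    exact (PySem.Dict.contains_iff_mem_keys d p.1).mpr
      (hkeys_d ▸ List.mem_map.mpr ⟨p, hp, rfl⟩)
  have hgetD : ∀ p : String × String, p ∈ sd → d.getD p.1 "" = p.2 := by
    intro p hp
    exact PySem.Dict.getD_of_mem_items d (by rw [hitems_d]; exact hp) hndk ""
  obtain ⟨hnd1, hval1, hcont1, hpw1⟩ := foldl_stepOrden_char d oc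
  rw [← hr1] at hnd1 hval1 hcont1 hpw1
  -- membership characterisation of the first loop's items
  have hmem_r1 : ∀ p : String × String, p ∈ r1.items ↔ (p ∈ sd ∧ p.1 ∈ oc) := by
    intro p
    constructor
    · intro hp
      obtain ⟨hv, hoc, hdc⟩ := hval1 p hp
      have : p.1 ∈ d.keys := (PySem.Dict.contains_iff_mem_keys d p.1).mp hdc
      rw [hkeys_d] at this
      obtain ⟨q, hq, hq1⟩ := List.mem_map.mp this
      have hv2 : p.2 = q.2 := by rw [hv, ← hq1, hgetD q hq]
      have : p = q := Prod.ext hq1.symm hv2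
      exact ⟨this ▸ hq, hoc⟩
    · rintro ⟨hp, hoc⟩
      have hc : r1.contains p.1 = true := (hcont1 p.1).mpr ⟨hoc, hdcont p hp⟩
      have : p.1 ∈ r1.keys := (PySem.Dict.contains_iff_mem_keys r1 p.1).mp hc
      have hkeys_r1 : r1.keys = r1.items.map Prod.fst := rfl
      rw [hkeys_r1] at this
      obtain ⟨q, hq, hq1⟩ := List.mem_map.mp this
      have hv : q.2 = p.2 := by rw [(hval1 q hq).1, hq1, hgetD p hp]
      have : q = p := Prod.ext hq1 hv
      exact this ▸ hq
  -- the A side: first loop's items, then unseen entries of sd in order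
  have hAside : (d.items.foldl pvStepExtra r1).items
      = r1.items ++ sd.filter (fun p => !(r1.contains p.1)) := by
    rw [hitems_d]; exact foldl_stepExtra_items sd r1 hpre'
  -- the B side: the sort splits at the sentinel
  have hsortnd : ((PySem.List.sorted sd key).map Prod.fst).Nodup := by
    have hperm := (PySem.List.sorted_perm sd key false).map Prod.fst
    exact (hperm.nodup_iff).mpr hpre'
  have hBof : (PySem.Dict.ofList (PySem.List.sorted d.items key)).items
      = PySem.List.sorted sd key := by
    rw [hitems_d]; exact items_ofList_of_nodup _ hsortnd
  have hsplit : PySem.List.sorted sd key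
      = PySem.List.sorted (sd.filter (fun x => decide (key x < n))) key
          ++ sd.filter (fun x => decide (key x = n)) :=
    sorted_split_sentinel key n sd (fun x _ => hkeyle x)
  -- head of the split = first loop's items
  have hhead : PySem.List.sorted (sd.filter (fun x => decide (key x < n))) key = r1.items := by
    apply PySem.List.sorted_eq_of_perm_of_pairwise_lt
    · -- permutation
      apply List.perm_of_nodup_nodup_toFinset_eq
      · exact (List.Nodup.of_map Prod.fst hnd1 : r1.items.Nodup)
      · exact (List.Nodup.of_map Prod.fst hpre').filter _
      · ext p
        simp only [List.mem_toFinset, List.mem_filter, decide_eq_true_eq]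
        rw [hmem_r1 p, hklt p]
    · -- strictly increasing keys
      refine hpw1.imp_of_mem ?_
      intro a b ha hb hab
      have ha1 : a.1 ∈ oc := (hval1 a ha).2.1
      have hb1 : b.1 ∈ oc := (hval1 b hb).2.1
      rw [hkey a, if_pos ha1, hkey b, if_pos hb1]
      exact_mod_cast hab
  -- tail of the split = the entries the second loop appends
  have htail : sd.filter (fun x => decide (key x = n))
      = sd.filter (fun p => !(r1.contains p.1)) := by
    apply List.filter_congr
    intro p hp
    by_cases hoc : p.1 ∈ oc
    · have h1 : ¬ (key p = n) := fun h => (hkeq p).mp h hoc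
      have h2 : r1.contains p.1 = true := (hcont1 p.1).mpr ⟨hoc, hdcont p hp⟩
      simp [h1, h2]
    · have h1 : key p = n := by rw [hkey p, if_neg hoc, hnlen]
      have h2 : r1.contains p.1 = false := by
        rw [Bool.eq_false_iff]
        intro hc
        exact hoc ((hcont1 p.1).mp hc).1
      simp [h1, h2]
  rw [hAside, hBof, hsplit, hhead, htail]
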